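-- pv_equiv track=rewrite | github.com/markh-de/KiVar | plugin/kivar.py | escape_string_if_required
-- ===== SOURCE A (Python) =====
-- def escape_string_if_required(str):
--     if any(c in str for c in (',', ' ', '-', '\\', '(', ')')):
--         result = "'"
--         for c in str:
--             if c == '\\' or c == "'":
--                 result += '\\'
--             result += c
--         result += "'"
--     else:
--         result = str
--     return result
-- ===== SOURCE B (Python) =====
-- def escape_string_if_required(str):
--     if any(c in str for c in (',', ' ', '-', '\\', '(', ')')):
--         return "'" + str.replace('\\', '\\\\').replace("'", "\\'") + "'"
--     return str
-- ===== Notes on version B (the rewrite author's own statement) =====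
-- stated objective: idiomatic
-- what changed: Replaced the char-by-char accumulation loop with two chained str.replace passes (backslash doubling first, then quote escaping) wrapped in quotes.
import Mathlib
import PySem

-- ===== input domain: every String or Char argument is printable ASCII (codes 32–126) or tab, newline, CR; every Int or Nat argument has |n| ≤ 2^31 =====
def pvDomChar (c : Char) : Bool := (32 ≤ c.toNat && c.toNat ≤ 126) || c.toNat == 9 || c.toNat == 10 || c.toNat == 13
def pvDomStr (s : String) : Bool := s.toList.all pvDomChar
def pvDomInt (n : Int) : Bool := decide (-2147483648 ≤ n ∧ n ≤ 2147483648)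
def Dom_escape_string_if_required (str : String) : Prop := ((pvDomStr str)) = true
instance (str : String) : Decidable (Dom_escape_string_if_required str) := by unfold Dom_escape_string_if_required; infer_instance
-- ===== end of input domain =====

-- B replaces A's char-by-char accumulation loop with two chained str.replace passes (simpler/idiomatic).

-- ===== PORT A =====
def escape_string_if_required (str : String) : String :=
  if [",", " ", "-", "\\", "(", ")"].any (fun c => PySem.Str.isIn c str) then
    ((str.toList.foldl
        (fun result c => (if c = '\\' ∨ c = '\'' then result.push '\\' else result).push c)
        "'").push '\'')
  else str

-- ===== PORT B =====
def escape_string_if_required_alt (str : String) : String :=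
  if [",", " ", "-", "\\", "(", ")"].any (fun c => PySem.Str.isIn c str) then
    "'" ++ PySem.Str.replace (PySem.Str.replace str "\\" "\\\\") "'" "\\'" ++ "'"
  else str

-- ===== PRECONDITION & SPEC =====
def Spec_escape_string_if_required (str : String) (out : String) : Prop := out = escape_string_if_required_alt str
instance (str : String) (out : String) : Decidable (Spec_escape_string_if_required str out) := by unfold Spec_escape_string_if_required; infer_instance

-- ===== CLAIM (what is proved, stated in full; the proofs are below) =====
def Claim_equal_escape_string_if_required : Prop := ∀ (str : String), Dom_escape_string_if_required str → Spec_escape_string_if_required str (escape_string_if_required str)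

-- ===== LEMMAS AND PROOFS =====

-- single-character replace, characterised as a flatMap
theorem replace_go_single (o : Char) (new : List Char) :
    ∀ (fuel : Nat) (l acc : List Char), l.length ≤ fuel →
      PySem.Chars.replace.go [o] new fuel l acc
        = acc.reverse ++ l.flatMap (fun c => if c = o then new else [c]) := by
  intro fuel
  induction fuel with
  | zero =>
    intro l acc h
    have : l = [] := List.eq_nil_of_length_eq_zero (Nat.le_zero.mp h)
    subst this
    simp [PySem.Chars.replace.go]
  | succ n ih =>
    intro l acc h
    cases l with
    | nil => simp [PySem.Chars.replace.go]
    | cons c t =>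
      by_cases hc : c = o
      · subst hc
        have hpre : List.isPrefixOf [c] (c :: t) = true := by
          simp [List.isPrefixOf]
        simp only [PySem.Chars.replace.go, hpre, if_true]
        rw [ih (List.drop [c].length (c :: t)) (new.reverse ++ acc) (by simpa using Nat.le_of_succ_le_succ h)]
        simp
      · have hpre : List.isPrefixOf [o] (c :: t) = false := by
          simp [List.isPrefixOf]
          exact fun h' => (hc h'.symm).elim
        simp only [PySem.Chars.replace.go, hpre, Bool.false_eq_true, if_false]
        rw [ih t (c :: acc) (by simpa using Nat.le_of_succ_le_succ h)]
        simp [hc]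

theorem replace_single (s : List Char) (o : Char) (new : List Char) :
    PySem.Chars.replace s [o] new = s.flatMap (fun c => if c = o then new else [c]) := by
  simp [PySem.Chars.replace]
  rw [replace_go_single o new s.length s [] (le_refl _)]
  simp

def escChar (c : Char) : List Char := if c = '\\' ∨ c = '\'' then ['\\', c] else [c]

theorem foldA (l : List Char) (r : String) :
    (l.foldl (fun result c => (if c = '\\' ∨ c = '\'' then result.push '\\' else result).push c) r).toList
      = r.toList ++ l.flatMap escChar := by
  induction l generalizing r with
  | nil => simp
  | cons c t ih =>
    simp only [List.foldl_cons, ih, List.flatMap_cons, escChar]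
    split_ifs with h <;> simp

theorem body_eq (s : List Char) :
    PySem.Chars.replace (PySem.Chars.replace s ['\\'] ['\\', '\\']) ['\''] ['\\', '\'']
      = s.flatMap escChar := by
  rw [replace_single, replace_single, List.flatMap_assoc]
  apply List.flatMap_congr
  intro c _
  by_cases h1 : c = '\\'
  · subst h1; simp [escChar]
  · by_cases h2 : c = '\''
    · subst h2; simp [escChar]
    · simp [h1, h2, escChar]

-- ===== VERDICT (by name: the statement is the Claim_ definition above) =====
theorem escape_string_if_required_spec : Claim_equal_escape_string_if_required := by
  intro str _
  unfold Spec_escape_string_if_required escape_string_if_required escape_string_if_required_alt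
  split
  · apply String.ext
    rw [String.toList_push, foldA]
    simp only [String.toList_append, PySem.Str.toList_replace, PySem.Str.toList_replace]
    have hb := body_eq str.toList
    simp only [show ("\\" : String).toList = ['\\'] from rfl,
        show ("\\\\" : String).toList = ['\\', '\\'] from rfl,
        show ("'" : String).toList = ['\''] from rfl,
        show ("\\'" : String).toList = ['\\', '\''] from rfl, hb]
  · rfl
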